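-- pv_equiv track=rewrite | github.com/paveldv42/project_1 | projekt_1.py | starts_with_uppercase
-- ===== SOURCE A (Python) =====
-- def starts_with_uppercase(text):
--     """
--     This function finds the upper case words in the given text and returns an int
--     """
--     uppercase_count = int(0)
--     remove_newlines1 = text.replace("\n", " ")
--     remove_whitespace1 = remove_newlines1.strip()
--     create_list = remove_whitespace1.split()
--
--     for word in create_list:
--         if word[0].isupper() != True:
--             uppercase_count
--         else:
--             word[0].isupper() == True
--             uppercase_count += 1
--
--     return uppercase_count
-- ===== SOURCE B (Python) =====
-- def starts_with_uppercase(text):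
--     """Single-pass scan: count word starts (non-space after space/begin) that are uppercase."""
--     count = 0
--     prev_space = True
--     for ch in text:
--         if ch.isspace():
--             prev_space = True
--         else:
--             if prev_space and ch.isupper():
--                 count += 1
--             prev_space = False
--     return count
-- ===== Notes on version B (the rewrite author's own statement) =====
-- stated objective: simpler
-- what changed: Replaces replace/strip/split list building plus a word loop with one character-by-character scan that detects word starts via a previous-was-whitespace flag and tests uppercase there.
import Mathlib
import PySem

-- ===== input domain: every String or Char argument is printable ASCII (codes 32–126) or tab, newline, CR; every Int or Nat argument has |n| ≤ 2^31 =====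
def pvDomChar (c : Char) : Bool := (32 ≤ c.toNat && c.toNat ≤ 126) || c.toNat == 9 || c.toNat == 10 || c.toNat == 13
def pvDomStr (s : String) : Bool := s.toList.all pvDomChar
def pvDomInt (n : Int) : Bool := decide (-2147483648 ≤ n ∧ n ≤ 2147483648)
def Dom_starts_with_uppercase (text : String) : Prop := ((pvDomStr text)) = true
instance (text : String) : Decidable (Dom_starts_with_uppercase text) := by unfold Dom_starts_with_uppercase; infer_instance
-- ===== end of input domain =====

-- B changes decomposition only: a single boundary-detecting character scan instead of
-- replace/strip/split plus a word loop; same O(n) cost, no speed claim.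

-- ===== PORT A =====
def starts_with_uppercase (text : String) : Int :=
  let remove_newlines1 := PySem.Str.replace text "\n" " "
  let remove_whitespace1 := PySem.Str.strip remove_newlines1
  let create_list := PySem.Str.split₀ remove_whitespace1
  create_list.foldl
    (fun uppercase_count word =>
      -- word[0]: split() never yields an empty word, so pyGet? is always `some`
      match PySem.List.pyGet? word.toList 0 with
      | none => uppercase_count
      | some c => if (PySem.Chars.isupper c != true) then uppercase_count else uppercase_count + 1)
    (0 : Int)

-- ===== PORT B =====
def starts_with_uppercase_alt (text : String) : Int :=
  (text.toList.foldl
    (fun (st : Int × Bool) ch =>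
      if PySem.Chars.isspace ch then (st.1, true)
      else (if st.2 && PySem.Chars.isupper ch then st.1 + 1 else st.1, false))
    ((0 : Int), true)).1

-- ===== PRECONDITION & SPEC =====
def Spec_starts_with_uppercase (text : String) (out : Int) : Prop := out = starts_with_uppercase_alt text
instance (text : String) (out : Int) : Decidable (Spec_starts_with_uppercase text out) := by unfold Spec_starts_with_uppercase; infer_instance

-- ===== CLAIM (what is proved, stated in full; the proofs are below) =====
def Claim_equal_starts_with_uppercase : Prop := ∀ (text : String), Dom_starts_with_uppercase text → Spec_starts_with_uppercase text (starts_with_uppercase text)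

-- ===== LEMMAS AND PROOFS =====

-- does a word (as a char list) start with an uppercase letter?
def headUpper (w : List Char) : Bool :=
  match w with
  | [] => false
  | c :: _ => PySem.Chars.isupper c

-- recursive form of B's scan: count of uppercase word starts, `prev` = previous char was whitespace
def scanC (cs : List Char) (prev : Bool) : Int :=
  match cs with
  | [] => 0
  | c :: t =>
    if PySem.Chars.isspace c then scanC t true
    else (if prev && PySem.Chars.isupper c then 1 else 0) + scanC t false

-- recursive form of A's word loop
def wcount (ws : List (List Char)) : Int :=
  match ws with
  | [] => 0
  | w :: t => (if headUpper w then 1 else 0) + wcount t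

theorem wcount_append (xs ys : List (List Char)) : wcount (xs ++ ys) = wcount xs + wcount ys := by
  induction xs with
  | nil => simp [wcount]
  | cons w t ih => simp [wcount, ih]; ring

-- A's foldl over the word list is wcount
theorem foldA_eq_wcount (ws : List (List Char)) (n : Int) :
    (ws.map String.ofList).foldl
      (fun uppercase_count word =>
        match PySem.List.pyGet? word.toList 0 with
        | none => uppercase_count
        | some c => if (PySem.Chars.isupper c != true) then uppercase_count else uppercase_count + 1)
      n = n + wcount ws := by
  induction ws generalizing n with
  | nil => simp [wcount]
  | cons w t ih =>
    cases w with
    | nil =>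
      rw [List.map_cons, List.foldl_cons]
      have h0 : PySem.List.pyGet? (String.ofList ([] : List Char)).toList 0 = none := by decide
      simp only [h0]
      rw [ih]
      simp [wcount, headUpper]
    | cons c r =>
      simp only [List.map, List.foldl, ih, wcount, headUpper]
      have : PySem.List.pyGet? (String.ofList (c :: r)).toList 0 = some c := by
        simp [PySem.List.pyGet?, PySem.List.pyIdx?]
      rw [this]
      by_cases h : PySem.Chars.isupper c = true <;> simp [h] <;> ring

-- B's foldl is scanC
theorem foldB_eq_scanC (cs : List Char) (n : Int) (prev : Bool) :
    (cs.foldl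
      (fun (st : Int × Bool) ch =>
        if PySem.Chars.isspace ch then (st.1, true)
        else (if st.2 && PySem.Chars.isupper ch then st.1 + 1 else st.1, false))
      (n, prev)).1 = n + scanC cs prev := by
  induction cs generalizing n prev with
  | nil => simp [scanC]
  | cons c t ih =>
    by_cases hs : PySem.Chars.isspace c = true
    · have hstep : (if PySem.Chars.isspace c = true then (((n, prev) : Int × Bool).1, true)
          else (if (((n, prev) : Int × Bool).2 && PySem.Chars.isupper c) = true then (n, prev).1 + 1 else (n, prev).1, false)) = ((n : Int), true) := by
        simp [hs]
      rw [List.foldl_cons, hstep, ih]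
      simp [scanC, hs]
    · by_cases hu : (prev && PySem.Chars.isupper c) = true
      · have hstep : (if PySem.Chars.isspace c = true then (((n, prev) : Int × Bool).1, true)
            else (if (((n, prev) : Int × Bool).2 && PySem.Chars.isupper c) = true then (n, prev).1 + 1 else (n, prev).1, false)) = ((n + 1 : Int), false) := by
          simp [hs, hu]
        rw [List.foldl_cons, hstep, ih]
        simp [scanC, hs, hu]
        ring
      · have hstep : (if PySem.Chars.isspace c = true then (((n, prev) : Int × Bool).1, true)
            else (if (((n, prev) : Int × Bool).2 && PySem.Chars.isupper c) = true then (n, prev).1 + 1 else (n, prev).1, false)) = ((n : Int), false) := by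
          simp [hs, hu]
        rw [List.foldl_cons, hstep, ih]
        simp [scanC, hs, hu]

-- the core correspondence: split₀.go's word count vs the character scan
theorem go_wcount (cs cur : List Char) (acc : List (List Char)) :
    wcount (PySem.Chars.split₀.go cs cur acc) =
      wcount acc.reverse + wcount (if cur.isEmpty then [] else [cur.reverse]) + scanC cs cur.isEmpty := by
  induction cs generalizing cur acc with
  | nil =>
    cases cur with
    | nil => simp [PySem.Chars.split₀.go, scanC, wcount]
    | cons c r =>
      simp [PySem.Chars.split₀.go, scanC, wcount, wcount_append]
  | cons c t ih =>
    by_cases hs : PySem.Chars.isspace c = true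
    · cases cur with
      | nil => simp [PySem.Chars.split₀.go, hs, ih, scanC, wcount]
      | cons d r =>
        simp [PySem.Chars.split₀.go, hs, ih, scanC, wcount, wcount_append]
    · cases cur with
      | nil =>
        simp [PySem.Chars.split₀.go, hs, ih, scanC, wcount, headUpper]
        by_cases hu : PySem.Chars.isupper c = true <;> simp [hu] <;> omega
      | cons d r =>
        have hhead : headUpper (r.reverse ++ [d, c]) = headUpper (r.reverse ++ [d]) := by
          cases hr : r.reverse with
          | nil => simp [headUpper]
          | cons e s => simp [headUpper]
        simp [PySem.Chars.split₀.go, hs, ih, scanC, wcount, hhead]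

theorem split₀_wcount (cs : List Char) :
    wcount (PySem.Chars.split₀ cs) = scanC cs true := by
  have := go_wcount cs [] []
  simpa [PySem.Chars.split₀, wcount] using this

-- the scan's final state
def scanState (cs : List Char) (prev : Bool) : Bool :=
  match cs with
  | [] => prev
  | c :: t => scanState t (PySem.Chars.isspace c)

theorem scanC_append (xs ys : List Char) (prev : Bool) :
    scanC (xs ++ ys) prev = scanC xs prev + scanC ys (scanState xs prev) := by
  induction xs generalizing prev with
  | nil => simp [scanC, scanState]
  | cons c t ih =>
    by_cases hs : PySem.Chars.isspace c = true
    · simp [scanC, scanState, hs, ih]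
    · simp [scanC, scanState, hs, ih]
      ring

theorem scanC_all_space (xs : List Char) :
    (∀ c ∈ xs, PySem.Chars.isspace c = true) → ∀ prev, scanC xs prev = 0 := by
  induction xs with
  | nil => intro _ _; simp [scanC]
  | cons c t ih =>
    intro h prev
    have hc := h c (by simp)
    simp [scanC, hc, ih (fun d hd => h d (by simp [hd])) true]

-- the scan ignores the '\n' → ' ' replacement
theorem scanC_map_nl (cs : List Char) (prev : Bool) :
    scanC (cs.map (fun c => if c = '\n' then ' ' else c)) prev = scanC cs prev := by
  induction cs generalizing prev with
  | nil => simp [scanC]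
  | cons c t ih =>
    by_cases h : c = '\n'
    · subst h
      have h1 : PySem.Chars.isspace ' ' = true := by decide
      have h2 : PySem.Chars.isspace '\n' = true := by decide
      simp [scanC, h1, h2, ih]
    · simp [scanC, h, ih]

-- replace with single-char old/new is a map (when given enough fuel)
theorem replace_go_single (old new : Char) (l acc : List Char) (fuel : Nat) (hf : l.length ≤ fuel) :
    PySem.Chars.replace.go [old] [new] fuel l acc =
      acc.reverse ++ l.map (fun c => if c = old then new else c) := by
  induction l generalizing acc fuel with
  | nil => cases fuel <;> simp [PySem.Chars.replace.go]
  | cons c t ih =>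
    cases fuel with
    | zero => simp at hf
    | succ f =>
      by_cases h : c = old
      · subst h
        simp [PySem.Chars.replace.go, List.isPrefixOf, ih _ f (by simpa using hf)]
      · have hp : [old].isPrefixOf (c :: t) = false := by
          simp [List.isPrefixOf]; exact fun he => (h he.symm).elim
        simp [PySem.Chars.replace.go, hp, h, ih _ f (by simpa using hf)]

theorem scanC_lstrip (cs : List Char) :
    scanC (PySem.Chars.lstrip cs) true = scanC cs true := by
  induction cs with
  | nil => rfl
  | cons c t ih =>
    by_cases h : PySem.Chars.isspace c = true
    · simpa [PySem.Chars.lstrip, h, scanC] using ih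
    · simp [PySem.Chars.lstrip, h, List.dropWhile]

theorem scanC_rstrip (cs : List Char) (prev : Bool) :
    scanC (PySem.Chars.rstrip cs) prev = scanC cs prev := by
  have h1 : cs.reverse.takeWhile PySem.Chars.isspace ++ cs.reverse.dropWhile PySem.Chars.isspace = cs.reverse :=
    List.takeWhile_append_dropWhile
  have hdecomp : cs = PySem.Chars.rstrip cs ++ (cs.reverse.takeWhile PySem.Chars.isspace).reverse := by
    rw [PySem.Chars.rstrip]
    calc cs = cs.reverse.reverse := by simp
      _ = (cs.reverse.takeWhile PySem.Chars.isspace ++ cs.reverse.dropWhile PySem.Chars.isspace).reverse := by rw [h1]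
      _ = (cs.reverse.dropWhile PySem.Chars.isspace).reverse ++ (cs.reverse.takeWhile PySem.Chars.isspace).reverse := by
          rw [List.reverse_append]
  have hall : ∀ c ∈ (cs.reverse.takeWhile PySem.Chars.isspace).reverse, PySem.Chars.isspace c = true := by
    intro c hc
    exact List.mem_takeWhile_imp (List.mem_reverse.mp hc)
  calc scanC (PySem.Chars.rstrip cs) prev
      = scanC (PySem.Chars.rstrip cs) prev + scanC (cs.reverse.takeWhile PySem.Chars.isspace).reverse (scanState (PySem.Chars.rstrip cs) prev) := by
        rw [scanC_all_space _ hall]; ring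
    _ = scanC cs prev := by rw [← scanC_append]; exact congrArg (scanC · prev) hdecomp.symm

theorem scanC_strip (cs : List Char) :
    scanC (PySem.Chars.strip cs) true = scanC cs true := by
  rw [PySem.Chars.strip, scanC_rstrip, scanC_lstrip]

-- ===== VERDICT (by name: the statement is the Claim_ definition above) =====
theorem starts_with_uppercase_spec : Claim_equal_starts_with_uppercase := by
  intro text _
  show starts_with_uppercase text = starts_with_uppercase_alt text
  unfold starts_with_uppercase starts_with_uppercase_alt
  rw [foldB_eq_scanC]
  simp only [PySem.Str.split₀]
  rw [foldA_eq_wcount, split₀_wcount]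
  have hnl : ("\n" : String).toList = ['\n'] := by rfl
  have hsp : (" " : String).toList = [' '] := by rfl
  have htl : (PySem.Str.strip (PySem.Str.replace text "\n" " ")).toList
      = PySem.Chars.strip (PySem.Chars.replace text.toList ['\n'] [' ']) := by
    rw [PySem.Str.toList_strip, PySem.Str.toList_replace, hnl, hsp]
  rw [htl]
  rw [scanC_strip]
  have hrep : PySem.Chars.replace text.toList ['\n'] [' ']
      = text.toList.map (fun c => if c = '\n' then ' ' else c) := by
    rw [PySem.Chars.replace]
    simp only [List.isEmpty_cons, Bool.false_eq_true, if_false]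
    exact replace_go_single '\n' ' ' text.toList [] text.toList.length le_rfl
  rw [hrep, scanC_map_nl]
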